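-- pv_equiv track=rewrite | github.com/benbendaisy/CommunicationCodes | python_module/examples/254_Factor_Combinations.py | getFactors4
-- ===== SOURCE A (Python) =====
-- from typing import List
--
-- def getFactors4(n: int) -> List[List[int]]:
--     def backtrack(start, target, path, result):
--         if target == 1:
--             if len(path) > 1:
--                 result.append(path.copy())
--             return
--
--         for i in range(start, target + 1):
--             if i > target:
--                 break
--             if target % i == 0:
--                 path.append(i)
--                 backtrack(i, target // i, path, result)
--                 path.pop()
--
--     result = []
--     backtrack(2, n, [], result)
--     return result
-- ===== SOURCE B (Python) =====
-- def getFactors4(n):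
--     def fac(s, t):
--         # all lists of at least two nondecreasing factors >= s with product t,
--         # in the same lexicographic order A emits; divisors are scanned only
--         # up to sqrt(t), the terminal pair [i, t // i] is emitted directly
--         out = []
--         i = s
--         while i * i <= t:
--             if t % i == 0:
--                 for tail in fac(i, t // i):
--                     out.append([i] + tail)
--                 out.append([i, t // i])
--             i += 1
--         return out
--     return fac(2, n)
-- ===== Notes on version B (the rewrite author's own statement) =====
-- stated objective: faster
-- what changed: A scans every candidate i from start to target at each recursion level; B scans divisors only up to sqrt(target) and emits the terminal pair [i, t//i] directly, which also makes the top-level len>1 filter unnecessary.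
import Mathlib
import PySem

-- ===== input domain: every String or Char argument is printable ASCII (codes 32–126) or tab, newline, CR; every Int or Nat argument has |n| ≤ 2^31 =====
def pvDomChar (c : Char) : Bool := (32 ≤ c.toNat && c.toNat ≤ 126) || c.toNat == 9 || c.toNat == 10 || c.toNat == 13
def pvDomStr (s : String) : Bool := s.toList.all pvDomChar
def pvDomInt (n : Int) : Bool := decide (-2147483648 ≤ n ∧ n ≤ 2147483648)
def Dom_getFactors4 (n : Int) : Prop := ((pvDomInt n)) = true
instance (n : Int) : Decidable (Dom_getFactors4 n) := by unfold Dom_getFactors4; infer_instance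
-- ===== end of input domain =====

-- B enumerates divisors only up to sqrt(target) per level instead of A's scan to target (faster, asymptotic per level).

-- ===== PORT A =====
-- A's recursion is ported with a fuel argument that only makes it total; the fuel
-- chosen in getFactors4 is always sufficient, so it never alters the computed value.
mutual
  -- `backtrack(start, target, path, result)` of A
  def pvBacktrackA : Nat → Int → Int → List Int → List (List Int) → List (List Int)
    | 0, _, _, _, result => result
    | f + 1, start, target, path, result =>
      if target = 1 then
        (if 1 < path.length then result ++ [path] else result)
      else
        pvLoopA f start start target path result
  -- `for i in range(start, target + 1): …` of A, iterating i
  def pvLoopA : Nat → Int → Int → Int → List Int → List (List Int) → List (List Int)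
    | 0, _, _, _, _, result => result
    | f + 1, i, start, target, path, result =>
      if i < target + 1 then
        if target < i then result   -- `if i > target: break` (never fires inside the range)
        else if PySem.Int.mod target i = 0 then
          pvLoopA f (i + 1) start target path
            (pvBacktrackA f i (PySem.Int.floordiv target i) (path ++ [i]) result)
        else
          pvLoopA f (i + 1) start target path result
      else result
end

def getFactors4 (n : Int) : List (List Int) :=
  pvBacktrackA (2 * n.toNat + 2) 2 n [] []

-- ===== PORT B =====
-- fac(s, t) of B, with the same kind of sufficiency-only fuel.
mutual
  def pvFacB : Nat → Int → Int → List (List Int)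
    | 0, _, _ => []
    | f + 1, s, t => pvFacLoopB f s t
  -- `while i * i <= t: …` of B, iterating i
  def pvFacLoopB : Nat → Int → Int → List (List Int)
    | 0, _, _ => []
    | f + 1, i, t =>
      if i * i ≤ t then
        (if PySem.Int.mod t i = 0 then
          (pvFacB f i (PySem.Int.floordiv t i)).map (fun tail => i :: tail)
            ++ [[i, PySem.Int.floordiv t i]]
        else []) ++ pvFacLoopB f (i + 1) t
      else []
end

def getFactors4_alt (n : Int) : List (List Int) :=
  pvFacB (2 * n.toNat + 2) 2 n

-- ===== PRECONDITION & SPEC =====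
def Spec_getFactors4 (n : Int) (out : List (List Int)) : Prop := out = getFactors4_alt n
instance (n : Int) (out : List (List Int)) : Decidable (Spec_getFactors4 n out) := by unfold Spec_getFactors4; infer_instance

-- ===== CLAIM (what is proved, stated in full; the proofs are below) =====
def Claim_equal_getFactors4 : Prop := ∀ (n : Int), Dom_getFactors4 n → Spec_getFactors4 n (getFactors4 n)

-- ===== LEMMAS AND PROOFS =====

-- B's loop is empty once i*i > t
lemma pvFacLoopB_empty (g : Nat) (i t : Int) (h : t < i * i) : pvFacLoopB g i t = [] := by
  cases g with
  | zero => rfl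
  | succ g => simp [pvFacLoopB, not_le.mpr h]

-- Main invariant: A's loop from i equals B's loop from i (mapped over path)
-- followed by the single terminal path++[t] that A's candidates i ≤ sqrt(t) < i ≤ t produce.
lemma pv_main : ∀ (N : Nat) (t : Int), t.toNat ≤ N → 2 ≤ t →
    ∀ (K : Nat) (i : Int), 2 ≤ i → (t + 1 - i).toNat ≤ K →
    ∀ (fa gb : Nat) (start : Int) (path : List Int) (result : List (List Int)),
      t.toNat + (t + 1 - i).toNat ≤ fa → t.toNat + (t + 1 - i).toNat ≤ gb →
      pvLoopA fa i start t path result =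
        result ++ (pvFacLoopB gb i t).map (fun q => path ++ q)
          ++ (if i ≤ t ∧ path ≠ [] then [path ++ [t]] else []) := by
  intro N
  induction N with
  | zero => intro t hN ht; omega
  | succ N ih =>
    intro t hN ht K
    induction K with
    | zero =>
      intro i hi hK fa gb start path result hfa hgb
      have hit : t < i := by omega
      obtain ⟨fa1, rfl⟩ : ∃ m, fa = m + 1 := ⟨fa - 1, by omega⟩
      have hB : pvFacLoopB gb i t = [] := pvFacLoopB_empty gb i t (by nlinarith)
      simp [pvLoopA, hB, show ¬ (i < t + 1) by omega, show ¬ (i ≤ t) by omega]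
    | succ K ihK =>
      intro i hi hK fa gb start path result hfa hgb
      by_cases hit : t < i
      · obtain ⟨fa1, rfl⟩ : ∃ m, fa = m + 1 := ⟨fa - 1, by omega⟩
        have hB : pvFacLoopB gb i t = [] := pvFacLoopB_empty gb i t (by nlinarith)
        simp [pvLoopA, hB, show ¬ (i < t + 1) by omega, show ¬ (i ≤ t) by omega]
      · -- i ≤ t
        have hile : i ≤ t := by omega
        obtain ⟨fa1, rfl⟩ : ∃ m, fa = m + 1 := ⟨fa - 1, by omega⟩
        obtain ⟨gb1, rfl⟩ : ∃ m, gb = m + 1 := ⟨gb - 1, by omega⟩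
        have hipos : (0:Int) < i := by omega
        rw [show pvLoopA (fa1 + 1) i start t path result =
            (if PySem.Int.mod t i = 0 then
              pvLoopA fa1 (i + 1) start t path
                (pvBacktrackA fa1 i (PySem.Int.floordiv t i) (path ++ [i]) result)
            else pvLoopA fa1 (i + 1) start t path result) by
          simp [pvLoopA, show i < t + 1 by omega, show ¬ (t < i) by omega]]
        rw [PySem.Int.mod_eq_emod_of_pos hipos, PySem.Int.floordiv_eq_ediv_of_pos hipos]
        by_cases hmod : t % i = 0
        · -- i divides t
          have hdt0 : i * (t / i) = t := by
            have h := Int.emod_add_mul_ediv t i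
            omega
          set d : Int := t / i with hd
          have hdt : i * d = t := hdt0
          have hd1 : 1 ≤ d := by nlinarith
          by_cases hsq : i * i ≤ t
          · -- i ≤ sqrt t : real subtree
            have hid : i ≤ d := le_of_mul_le_mul_left (by rw [hdt]; exact hsq) hipos
            have hd2 : 2 ≤ d := by omega
            have h2d : 2 * d ≤ t := by nlinarith
            have hilt : i < t := by nlinarith
            obtain ⟨fa2, rfl⟩ : ∃ m, fa1 = m + 1 := ⟨fa1 - 1, by omega⟩
            have hbt : pvBacktrackA (fa2 + 1) i d (path ++ [i]) result =
                pvLoopA fa2 i i d (path ++ [i]) result := by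
              simp [pvBacktrackA, show d ≠ 1 by omega]
            obtain ⟨gb2, rfl⟩ : ∃ m, gb1 = m + 1 := ⟨gb1 - 1, by omega⟩
            have hrec := ih d (by omega) hd2 ((d + 1 - i).toNat) i hi le_rfl
                fa2 gb2 i (path ++ [i]) result (by omega) (by omega)
            rw [if_pos ⟨hid, by simp⟩] at hrec
            rw [if_pos hmod, hbt, hrec,
              ihK (i + 1) (by omega) (by omega) (fa2 + 1) (gb2 + 1) start path _
                (by omega) (by omega)]
            rw [show pvFacLoopB (gb2 + 1 + 1) i t =
                ((pvFacB (gb2 + 1) i d).map (fun tail => i :: tail) ++ [[i, d]])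
                  ++ pvFacLoopB (gb2 + 1) (i + 1) t by
              simp [pvFacLoopB, hsq, PySem.Int.mod_eq_emod_of_pos hipos,
                PySem.Int.floordiv_eq_ediv_of_pos hipos, hmod, ← hd]]
            have htail : (if i + 1 ≤ t ∧ path ≠ [] then [path ++ [t]] else [])
                = (if i ≤ t ∧ path ≠ [] then [path ++ [t]] else []) := by
              by_cases hp : path = [] <;> simp [hp, show i + 1 ≤ t by omega, hile]
            rw [htail, show pvFacB (gb2 + 1) i d = pvFacLoopB gb2 i d from rfl]
            simp [List.map_append, List.map_map, Function.comp, List.append_assoc]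
          · -- sqrt t < i : divisor with empty subtree
            have hdi : d < i := by nlinarith
            by_cases hieq : i = t
            · -- i = t : the terminal path
              have hdone : d = 1 := by
                have : i * d = i * 1 := by rw [hdt, mul_one, hieq]
                exact mul_left_cancel₀ (by omega) this
              subst hieq
              obtain ⟨fa2, rfl⟩ : ∃ m, fa1 = m + 1 := ⟨fa1 - 1, by omega⟩
              have hbt : pvBacktrackA (fa2 + 1) i d (path ++ [i]) result =
                  (if path ≠ [] then result ++ [path ++ [i]] else result) := by
                by_cases hp : path = [] <;>
                  simp [pvBacktrackA, hdone, hp, List.length_append]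
              rw [if_pos hmod, hbt,
                ihK (i + 1) (by omega) (by omega) (fa2 + 1) (gb1 + 1) start path _
                  (by omega) (by omega)]
              have hB1 : pvFacLoopB (gb1 + 1) (i + 1) i = [] :=
                pvFacLoopB_empty _ _ _ (by nlinarith)
              have hB2 : pvFacLoopB (gb1 + 1) i i = [] :=
                pvFacLoopB_empty _ _ _ (by nlinarith)
              rw [hB1, hB2]
              by_cases hp : path = [] <;>
                simp [hp, show ¬ (i + 1 ≤ i) by omega]
            · -- i < t, i*i > t : contributes nothing
              have hilt : i < t := by omega
              have hd2 : 2 ≤ d := by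
                rcases lt_or_ge d 2 with h | h
                · exfalso
                  have hde : d = 1 := by omega
                  rw [hde, mul_one] at hdt; omega
                · exact h
              obtain ⟨fa2, rfl⟩ : ∃ m, fa1 = m + 1 := ⟨fa1 - 1, by omega⟩
              obtain ⟨fa3, rfl⟩ : ∃ m, fa2 = m + 1 := ⟨fa2 - 1, by omega⟩
              have hbt : pvBacktrackA (fa3 + 1 + 1) i d (path ++ [i]) result = result := by
                simp [pvBacktrackA, show d ≠ 1 by omega, pvLoopA,
                  show ¬ (i < d + 1) by omega]
              rw [if_pos hmod, hbt,
                ihK (i + 1) (by omega) (by omega) (fa3 + 1 + 1) (gb1 + 1) start path result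
                  (by omega) (by omega)]
              have hB1 : pvFacLoopB (gb1 + 1) (i + 1) t = [] :=
                pvFacLoopB_empty _ _ _ (by nlinarith)
              have hB2 : pvFacLoopB (gb1 + 1) i t = [] :=
                pvFacLoopB_empty _ _ _ (by omega)
              have htail : (if i + 1 ≤ t ∧ path ≠ [] then [path ++ [t]] else [])
                  = (if i ≤ t ∧ path ≠ [] then [path ++ [t]] else []) := by
                by_cases hp : path = [] <;> simp [hp, show i + 1 ≤ t by omega, hile]
              rw [hB1, htail, hB2]
        · -- i does not divide t
          have hne : i ≠ t := by
            intro h; rw [h] at hmod; simp at hmod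
          rw [if_neg hmod,
            ihK (i + 1) (by omega) (by omega) fa1 gb1 start path result
              (by omega) (by omega)]
          have hloop : pvFacLoopB (gb1 + 1) i t = pvFacLoopB gb1 (i + 1) t := by
            by_cases hsq : i * i ≤ t
            · simp [pvFacLoopB, hsq, PySem.Int.mod_eq_emod_of_pos hipos, hmod]
            · rw [pvFacLoopB_empty _ _ _ (by nlinarith),
                pvFacLoopB_empty _ _ _ (by nlinarith)]
          have htail : (if i + 1 ≤ t ∧ path ≠ [] then [path ++ [t]] else [])
              = (if i ≤ t ∧ path ≠ [] then [path ++ [t]] else []) := by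
            by_cases hp : path = [] <;>
              simp [hp, show i + 1 ≤ t by omega, hile]
          rw [hloop, htail]

-- backtrack-level corollary
lemma pv_backtrack (N : Nat) (t : Int) (hN : t.toNat ≤ N) (ht : 2 ≤ t)
    (s : Int) (hs : 2 ≤ s) (fa gb : Nat) (hfa : 2 * t.toNat ≤ fa) (hgb : 2 * t.toNat ≤ gb)
    (path : List Int) (result : List (List Int)) :
    pvBacktrackA fa s t path result =
      result ++ (pvFacB gb s t).map (fun q => path ++ q)
        ++ (if s ≤ t ∧ path ≠ [] then [path ++ [t]] else []) := by
  obtain ⟨fa1, rfl⟩ : ∃ m, fa = m + 1 := ⟨fa - 1, by omega⟩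
  obtain ⟨gb1, rfl⟩ : ∃ m, gb = m + 1 := ⟨gb - 1, by omega⟩
  rw [show pvBacktrackA (fa1 + 1) s t path result = pvLoopA fa1 s s t path result by
      simp [pvBacktrackA, show t ≠ 1 by omega],
    show pvFacB (gb1 + 1) s t = pvFacLoopB gb1 s t from rfl]
  exact pv_main N t hN ht ((t + 1 - s).toNat) s hs le_rfl fa1 gb1 s path result
    (by omega) (by omega)

-- ===== VERDICT (by name: the statement is the Claim_ definition above) =====
theorem getFactors4_spec : Claim_equal_getFactors4 := by
  intro n _
  unfold Spec_getFactors4 getFactors4 getFactors4_alt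
  by_cases hn : 2 ≤ n
  · rw [pv_backtrack n.toNat n le_rfl hn 2 le_rfl (2 * n.toNat + 2) (2 * n.toNat + 2)
      (by omega) (by omega) [] []]
    simp
  · rcases lt_or_ge n 1 with h | h
    · have h0 : n.toNat = 0 := by omega
      rw [h0]
      rw [show pvBacktrackA (2 * 0 + 2) 2 n [] [] = pvLoopA 1 2 2 n [] [] by
        simp [pvBacktrackA, show n ≠ 1 by omega]]
      rw [show pvLoopA 1 2 2 n [] [] = [] by
        simp [pvLoopA, show ¬ ((2:Int) < n + 1) by omega]]
      rw [show pvFacB (2 * 0 + 2) 2 n = pvFacLoopB 1 2 n from rfl]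
      rw [pvFacLoopB_empty _ _ _ (by omega)]
    · have h1 : n = 1 := by omega
      subst h1
      rfl
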